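-- pv_equiv track=rewrite | github.com/botify-labs/simpleflow | cdf/features/links/helpers/masks.py | list_to_mask
-- ===== SOURCE A (Python) =====
-- _NOFOLLOW_MASKS = [
--     (4, "robots"),
--     (2, "meta"),
--     (1, "link"),
-- ]
--
-- _PREV_NEXT_MASKS = [
--     (32, "next"),
--     (64, "prev")
-- ]
--
-- def list_to_mask(lst):
--     mask = 0
--     if lst == ['follow']:
--         return 0
--     for mask_int, mask_name in _NOFOLLOW_MASKS + _PREV_NEXT_MASKS:
--         if mask_name in lst:
--             mask += mask_int
--     return mask
-- ===== SOURCE B (Python) =====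
-- _FLAG_BITS = {"robots": 4, "meta": 2, "link": 1, "next": 32, "prev": 64}
--
--
-- def list_to_mask(lst):
--     # Sum the bit of each distinct recognised flag; unknown names contribute 0,
--     # so no special case for ['follow'] or the empty list is needed.
--     return sum(_FLAG_BITS.get(name, 0) for name in set(lst))
-- ===== Notes on version B (the rewrite author's own statement) =====
-- stated objective: simpler
-- what changed: Instead of scanning the fixed mask table with a membership test on the input for each entry plus an explicit special case for the follow-only list, B builds a constant name-to-bit dict and sums the dict value of each distinct input name, so the special cases fall out of the general rule.
import Mathlib
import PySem

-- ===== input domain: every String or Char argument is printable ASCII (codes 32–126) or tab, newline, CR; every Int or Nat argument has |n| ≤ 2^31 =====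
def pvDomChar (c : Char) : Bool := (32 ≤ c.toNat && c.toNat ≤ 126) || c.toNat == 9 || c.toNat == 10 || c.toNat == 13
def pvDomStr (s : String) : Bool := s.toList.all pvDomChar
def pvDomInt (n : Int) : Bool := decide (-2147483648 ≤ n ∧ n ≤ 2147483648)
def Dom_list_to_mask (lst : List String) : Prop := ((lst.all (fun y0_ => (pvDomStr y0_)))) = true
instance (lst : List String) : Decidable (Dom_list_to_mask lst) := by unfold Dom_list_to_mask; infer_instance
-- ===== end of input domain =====

-- B replaces A's scan of the fixed mask table (with membership tests on the input)
-- by a dict lookup over the deduplicated input; objective: simpler (the ['follow']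
-- special case disappears).


-- ===== PORT A =====
def nofollowMasks : List (Int × String) := [(4, "robots"), (2, "meta"), (1, "link")]

def prevNextMasks : List (Int × String) := [(32, "next"), (64, "prev")]

def list_to_mask (lst : List String) : Int :=
  let mask : Int := 0
  if lst = ["follow"] then 0
  else
    (nofollowMasks ++ prevNextMasks).foldl
      (fun mask p => if p.2 ∈ lst then mask + p.1 else mask) mask

-- ===== PORT B =====
def flagBits : PySem.Dict String Int :=
  PySem.Dict.ofList [("robots", 4), ("meta", 2), ("link", 1), ("next", 32), ("prev", 64)]

def list_to_mask_alt (lst : List String) : Int :=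
  ((PySem.Set.ofList lst).map (fun name => flagBits.getD name 0)).sum

-- ===== PRECONDITION & SPEC =====
def Spec_list_to_mask (lst : List String) (out : Int) : Prop := out = list_to_mask_alt lst
instance (lst : List String) (out : Int) : Decidable (Spec_list_to_mask lst out) := by unfold Spec_list_to_mask; infer_instance

-- ===== CLAIM (what is proved, stated in full; the proofs are below) =====
def Claim_equal_list_to_mask : Prop := ∀ (lst : List String), Dom_list_to_mask lst → Spec_list_to_mask lst (list_to_mask lst)

-- ===== LEMMAS AND PROOFS =====

-- canonical value: the sum of the bits whose flag name occurs in the list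
def gmask (lst : List String) : Int :=
  (if "robots" ∈ lst then 4 else 0) + (if "meta" ∈ lst then 2 else 0) +
  (if "link" ∈ lst then 1 else 0) + (if "next" ∈ lst then 32 else 0) +
  (if "prev" ∈ lst then 64 else 0)

theorem list_to_mask_eq_gmask (lst : List String) : list_to_mask lst = gmask lst := by
  unfold list_to_mask gmask
  split
  · next h => subst h; decide
  · simp [nofollowMasks, prevNextMasks, List.foldl]
    split_ifs <;> omega

theorem getD_flagBits_eq_zero (x : String) (h1 : x ≠ "robots") (h2 : x ≠ "meta")
    (h3 : x ≠ "link") (h4 : x ≠ "next") (h5 : x ≠ "prev") : flagBits.getD x 0 = 0 := by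
  have hit : flagBits.items = [("robots", 4), ("meta", 2), ("link", 1), ("next", 32), ("prev", 64)] := by
    decide
  have b1 : ("robots" == x) = false := by simp [Ne.symm h1]
  have b2 : ("meta" == x) = false := by simp [Ne.symm h2]
  have b3 : ("link" == x) = false := by simp [Ne.symm h3]
  have b4 : ("next" == x) = false := by simp [Ne.symm h4]
  have b5 : ("prev" == x) = false := by simp [Ne.symm h5]
  simp [PySem.Dict.getD, PySem.Dict.get?, hit, List.find?, b1, b2, b3, b4, b5]

theorem sum_map_getD_eq_gmask (s : List String) (hnd : s.Nodup) :
    (s.map (fun name => flagBits.getD name 0)).sum = gmask s := by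
  induction s with
  | nil => decide
  | cons x s ih =>
    rcases List.nodup_cons.mp hnd with ⟨hx, hs⟩
    have ihs := ih hs
    simp only [List.map_cons, List.sum_cons, ihs]
    by_cases h1 : x = "robots"
    · subst h1
      have hb : flagBits.getD "robots" 0 = 4 := by decide
      rw [hb]
      simp [gmask, List.mem_cons, hx]
      split_ifs <;> omega
    by_cases h2 : x = "meta"
    · subst h2
      have hb : flagBits.getD "meta" 0 = 2 := by decide
      rw [hb]
      simp [gmask, List.mem_cons, hx]
      split_ifs <;> omega
    by_cases h3 : x = "link"
    · subst h3
      have hb : flagBits.getD "link" 0 = 1 := by decide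
      rw [hb]
      simp [gmask, List.mem_cons, hx]
      split_ifs <;> omega
    by_cases h4 : x = "next"
    · subst h4
      have hb : flagBits.getD "next" 0 = 32 := by decide
      rw [hb]
      simp [gmask, List.mem_cons, hx]
      split_ifs <;> omega
    by_cases h5 : x = "prev"
    · subst h5
      have hb : flagBits.getD "prev" 0 = 64 := by decide
      rw [hb]
      simp [gmask, List.mem_cons, hx]
      split_ifs <;> omega
    · rw [getD_flagBits_eq_zero x h1 h2 h3 h4 h5]
      simp [gmask, List.mem_cons, Ne.symm h1, Ne.symm h2, Ne.symm h3, Ne.symm h4, Ne.symm h5]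

theorem list_to_mask_alt_eq_gmask (lst : List String) : list_to_mask_alt lst = gmask lst := by
  unfold list_to_mask_alt
  rw [sum_map_getD_eq_gmask _ (PySem.Set.nodup_ofList lst)]
  simp [gmask, PySem.Set.mem_ofList]

-- ===== VERDICT (by name: the statement is the Claim_ definition above) =====
theorem list_to_mask_spec : Claim_equal_list_to_mask := by
  intro lst _
  unfold Spec_list_to_mask
  rw [list_to_mask_eq_gmask, list_to_mask_alt_eq_gmask]
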